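-- pv_equiv track=rewrite | github.com/jbalcomb/STU-Extras | Piethawn/Piethawn/ida55_function_pair_diff.py | collapse_offsets
-- ===== SOURCE A (Python) =====
-- from typing import Dict, Iterable, List, Sequence, Tuple
--
-- def collapse_offsets(offsets: Sequence[int]) -> List[Tuple[int, int]]:
--     if not offsets:
--         return []
--     ranges: List[Tuple[int, int]] = []
--     start = prev = offsets[0]
--     for current in offsets[1:]:
--         if current == prev + 1:
--             prev = current
--             continue
--         ranges.append((start, prev + 1))
--         start = prev = current
--     ranges.append((start, prev + 1))
--     return ranges
-- ===== SOURCE B (Python) =====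
-- def collapse_offsets(offsets):
--     if not offsets:
--         return []
--     breaks = [(x + 1, y) for x, y in zip(offsets, offsets[1:]) if y != x + 1]
--     starts = [offsets[0]] + [s for _, s in breaks]
--     ends = [e for e, _ in breaks] + [offsets[-1] + 1]
--     return list(zip(starts, ends))
-- ===== Notes on version B (the rewrite author's own statement) =====
-- stated objective: alternative
-- what changed: Replaces the start/prev accumulator loop with a declarative pipeline: detect run boundaries by zipping the list with its shifted self, then zip the boundary-derived start and end lists.
import Mathlib
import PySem

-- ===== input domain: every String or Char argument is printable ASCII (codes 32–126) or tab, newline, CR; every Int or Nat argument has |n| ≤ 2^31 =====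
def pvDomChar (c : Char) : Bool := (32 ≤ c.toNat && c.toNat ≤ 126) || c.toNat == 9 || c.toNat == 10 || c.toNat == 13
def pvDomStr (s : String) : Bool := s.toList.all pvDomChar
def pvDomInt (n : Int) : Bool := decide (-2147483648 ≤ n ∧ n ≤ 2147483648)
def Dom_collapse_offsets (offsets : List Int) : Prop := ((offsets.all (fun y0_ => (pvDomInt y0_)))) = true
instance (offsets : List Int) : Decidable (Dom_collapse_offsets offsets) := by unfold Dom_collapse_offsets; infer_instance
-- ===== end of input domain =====

-- B: same ranges computed by boundary detection over adjacent pairs instead of a start/prev accumulator loop.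
-- ===== PORT A =====
def collapseLoopA : List Int → List (Int × Int) → Int → Int → List (Int × Int)
  | [], ranges, start, prev => ranges ++ [(start, prev + 1)]
  | c :: cs, ranges, start, prev =>
      if c = prev + 1 then collapseLoopA cs ranges start c
      else collapseLoopA cs (ranges ++ [(start, prev + 1)]) c c

def collapse_offsets (offsets : List Int) : List (Int × Int) :=
  match offsets with
  | [] => []
  | x :: rest => collapseLoopA rest [] x x

-- ===== PORT B =====
def collapse_offsets_alt (offsets : List Int) : List (Int × Int) :=
  match offsets with
  | [] => []
  | x :: xs =>
    let breaks := (((x :: xs).zip xs).filter (fun p => p.2 != p.1 + 1)).map (fun p => (p.1 + 1, p.2))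
    let starts := x :: breaks.map Prod.snd
    let ends := breaks.map Prod.fst ++ [((x :: xs).getLast?.getD x) + 1]
    starts.zip ends

-- ===== PRECONDITION & SPEC =====
def Spec_collapse_offsets (offsets : List Int) (out : List (Int × Int)) : Prop := out = collapse_offsets_alt offsets
instance (offsets : List Int) (out : List (Int × Int)) : Decidable (Spec_collapse_offsets offsets out) := by unfold Spec_collapse_offsets; infer_instance

-- ===== CLAIM (what is proved, stated in full; the proofs are below) =====
def Claim_equal_collapse_offsets : Prop := ∀ (offsets : List Int), Dom_collapse_offsets offsets → Spec_collapse_offsets offsets (collapse_offsets offsets)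

-- ===== LEMMAS AND PROOFS =====

-- break pairs of a nonempty list: (x+1, y) for each adjacent pair (x, y) with y ≠ x + 1
def brkl (l : List Int) : List (Int × Int) :=
  ((l.zip l.tail).filter (fun p => p.2 != p.1 + 1)).map (fun p => (p.1 + 1, p.2))

theorem brkl_cons_cons (a b : Int) (l : List Int) :
    brkl (a :: b :: l) = (if b ≠ a + 1 then [(a + 1, b)] else []) ++ brkl (b :: l) := by
  simp only [brkl, List.tail_cons, List.zip_cons_cons, List.filter_cons]
  by_cases h : b = a + 1 <;> simp [h]

theorem collapseLoopA_append (xs : List Int) (ranges : List (Int × Int)) (start prev : Int) :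
    collapseLoopA xs ranges start prev = ranges ++ collapseLoopA xs [] start prev := by
  induction xs generalizing ranges start prev with
  | nil => simp [collapseLoopA]
  | cons c cs ih =>
    simp only [collapseLoopA]
    by_cases h : c = prev + 1
    · simp only [if_pos h]; exact ih ranges start c
    · simp only [if_neg h, List.nil_append]
      rw [ih (ranges ++ [(start, prev + 1)]) c c, ih [(start, prev + 1)] c c, List.append_assoc]

theorem collapseLoopA_eq (xs : List Int) (start prev : Int) :
    collapseLoopA xs [] start prev =
      (start :: (brkl (prev :: xs)).map Prod.snd).zip
        ((brkl (prev :: xs)).map Prod.fst ++ [((prev :: xs).getLast?.getD prev) + 1]) := by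
  induction xs generalizing start prev with
  | nil => simp [collapseLoopA, brkl]
  | cons c cs ih =>
    rw [brkl_cons_cons]
    by_cases h : c = prev + 1
    · subst h
      simp only [collapseLoopA, ne_eq, not_true_eq_false, if_false, List.nil_append,
        List.getLast?_cons, Option.getD_some]
      have := ih start (prev + 1)
      simpa [List.getLast?_cons] using this
    · simp only [collapseLoopA, ne_eq, h, not_false_eq_true, if_true, if_false,
        List.getLast?_cons_cons, List.nil_append]
      rw [collapseLoopA_append cs [(start, prev + 1)] c c, ih c c]
      simp [List.zip_cons_cons, List.getLast?_cons]

-- ===== VERDICT (by name: the statement is the Claim_ definition above) =====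
theorem collapse_offsets_spec : Claim_equal_collapse_offsets := by
  intro offsets _
  unfold Spec_collapse_offsets
  cases offsets with
  | nil => rfl
  | cons x xs =>
    show collapseLoopA xs [] x x = _
    rw [collapseLoopA_eq]
    simp only [collapse_offsets_alt, brkl, List.tail_cons]
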